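-- pv_equiv track=rewrite | github.com/DominikWojtanowski/Matura-informatyka | 2010 - Maj/zadanie_4/zadanie_4.py | checkIfAnagram
-- ===== SOURCE A (Python) =====
-- from typing import List, Dict
--
-- def checkIfAnagram(firstLine, lines):
--     firstSet = set(firstLine)
--
--     for line in lines:
--         if firstSet != set(line):
--             return False
--
--     dictArr: List[Dict[str, int]] = []
--
--     for line in lines:
--         new_dict = dict()
--         for letter in line:
--             if letter in new_dict:
--                 new_dict[letter] += 1
--             else:
--                 new_dict[letter] = 1
--         dictArr.append(new_dict)
--
--     for unoDict in dictArr: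
--         if unoDict != dictArr[0]:
--             return False
--     return True
-- ===== SOURCE B (Python) =====
-- def checkIfAnagram(firstLine, lines):
--     if not lines:
--         return True
--     firstSet = set(firstLine)
--     ref = sorted(lines[0])
--     for line in lines:
--         if set(line) != firstSet or sorted(line) != ref:
--             return False
--     return True
-- ===== Notes on version B (the rewrite author's own statement) =====
-- stated objective: idiomatic
-- what changed: Replaces A's three separate passes (set comparisons, building a list of per-line counting dicts, comparing the dicts) with a single pass that compares set(line) to set(firstLine) and sorted(line) to sorted(lines[0]), i.e. the sorting-based anagram test.
import Mathlib
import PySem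

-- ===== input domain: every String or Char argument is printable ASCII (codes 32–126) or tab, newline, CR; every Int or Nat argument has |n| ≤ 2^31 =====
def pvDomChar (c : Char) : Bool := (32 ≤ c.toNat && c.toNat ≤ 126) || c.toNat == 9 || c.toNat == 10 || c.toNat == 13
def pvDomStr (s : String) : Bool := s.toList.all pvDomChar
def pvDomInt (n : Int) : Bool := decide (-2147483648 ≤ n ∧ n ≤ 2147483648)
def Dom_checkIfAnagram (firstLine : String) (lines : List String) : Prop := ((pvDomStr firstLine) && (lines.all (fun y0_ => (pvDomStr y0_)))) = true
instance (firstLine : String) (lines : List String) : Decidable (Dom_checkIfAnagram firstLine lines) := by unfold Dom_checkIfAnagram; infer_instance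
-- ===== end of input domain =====

-- B replaces A's three passes (set checks, building a list of per-line counting dicts,
-- comparing the dicts) with a single pass using the sorting-based anagram test; objective: more idiomatic.

-- ===== PORT A =====
-- Python's `unoDict != dictArr[0]` compares dicts as unordered key→value maps; for dicts with
-- distinct keys (PySem.Dict's invariant) `d1 == d2` is exactly: equal sizes and every item of
-- d1 found by lookup in d2. This helper is that equality test (exact on Nodup-key dicts).
def pyDictEqCI (d1 d2 : PySem.Dict Char Int) : Bool :=
  d1.size == d2.size && d1.items.all (fun p => d2.get? p.1 == some p.2)

-- the inner `for letter in line` counting loop of A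
def ciaCount (line : List Char) : PySem.Dict Char Int :=
  line.foldl (fun d letter =>
    if d.contains letter then d.insert letter (d.getD letter 0 + 1)
    else d.insert letter 1) PySem.Dict.empty

def checkIfAnagram (firstLine : String) (lines : List String) : Bool :=
  let firstSet := PySem.Set.ofList firstLine.toList
  if lines.any (fun line => !(PySem.Set.equal firstSet (PySem.Set.ofList line.toList))) then false
  else
    let dictArr : List (PySem.Dict Char Int) :=
      lines.foldl (fun arr line => arr ++ [ciaCount line.toList]) []
    match dictArr with
    | [] => true  -- the third loop runs zero times; dictArr[0] is never evaluated
    | d0 :: tl => if (d0 :: tl).any (fun d => !(pyDictEqCI d d0)) then false else true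

-- ===== PORT B =====
def checkIfAnagram_alt (firstLine : String) (lines : List String) : Bool :=
  match lines with
  | [] => true
  | first :: rest =>
    let firstSet := PySem.Set.ofList firstLine.toList
    let ref := PySem.List.sorted first.toList (fun c => c) false
    (first :: rest).all (fun line =>
      PySem.Set.equal (PySem.Set.ofList line.toList) firstSet &&
      (PySem.List.sorted line.toList (fun c => c) false == ref))

-- ===== PRECONDITION & SPEC =====
def Spec_checkIfAnagram (firstLine : String) (lines : List String) (out : Bool) : Prop := out = checkIfAnagram_alt firstLine lines
instance (firstLine : String) (lines : List String) (out : Bool) : Decidable (Spec_checkIfAnagram firstLine lines out) := by unfold Spec_checkIfAnagram; infer_instance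

-- ===== CLAIM (what is proved, stated in full; the proofs are below) =====
def Claim_equal_checkIfAnagram : Prop := ∀ (firstLine : String) (lines : List String), Dom_checkIfAnagram firstLine lines → Spec_checkIfAnagram firstLine lines (checkIfAnagram firstLine lines)

-- ===== LEMMAS AND PROOFS =====

-- A's hand-written counting loop builds collections.Counter(line)
theorem ciaCount_eq_counter (l : List Char) : ciaCount l = PySem.Dict.counter l := by
  have hf : (fun (d : PySem.Dict Char Int) letter =>
      if d.contains letter then d.insert letter (d.getD letter 0 + 1)
      else d.insert letter 1) =
      fun (d : PySem.Dict Char Int) x => d.insert x (d.getD x 0 + 1) := by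
    funext d x
    by_cases h : d.contains x = true
    · simp [h]
    · simp only [Bool.not_eq_true] at h
      rw [if_neg (by simp [h]), PySem.Dict.getD_of_not_contains d 0 h]
      norm_num
  unfold ciaCount
  rw [hf]
  exact PySem.Dict.foldl_insert_getD_add_one_eq_counter l

-- looking a key up in Counter(b)
theorem counter_get?_iff (b : List Char) (k : Char) (n : Nat) :
    (PySem.Dict.counter b).get? k = some (n : Int) ↔ (k ∈ b ∧ List.count k b = n) := by
  rw [PySem.Dict.get?_eq_some_iff_mem_items _ _ _ (PySem.Dict.nodup_keys_counter b)]
  simp only [PySem.Dict.items_counter, List.mem_map]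
  constructor
  · rintro ⟨k', hk', heq⟩
    simp only [Prod.mk.injEq, Nat.cast_inj] at heq
    obtain ⟨heq1, hc⟩ := heq
    subst heq1
    exact ⟨(PySem.Set.mem_ofList b _).mp hk', hc⟩
  · rintro ⟨hkb, hc⟩
    exact ⟨k, (PySem.Set.mem_ofList b k).mpr hkb, by simp [hc]⟩

-- Python's dict equality on two counting dicts is multiset equality of the counted lists
theorem pyDictEqCI_counter_iff (a b : List Char) :
    pyDictEqCI (PySem.Dict.counter a) (PySem.Dict.counter b) = true ↔ a.Perm b := by
  have hsize : ∀ (x : List Char),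
      (PySem.Dict.counter x).size = (PySem.Set.ofList x).length := by
    intro x
    simp [PySem.Dict.size, PySem.Dict.items_counter]
  unfold pyDictEqCI
  simp only [Bool.and_eq_true, beq_iff_eq, List.all_eq_true, hsize]
  constructor
  · rintro ⟨hlen, hall⟩
    have hmem : ∀ k ∈ a, k ∈ b ∧ List.count k b = List.count k a := by
      intro k hk
      have h := hall (k, (List.count k a : Int)) (by
        rw [PySem.Dict.items_counter]
        exact List.mem_map_of_mem ((PySem.Set.mem_ofList a k).mpr hk))
      exact (counter_get?_iff b k (List.count k a)).mp h
    have hsub : PySem.Set.ofList a ⊆ PySem.Set.ofList b := by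
      intro x hx
      exact (PySem.Set.mem_ofList b x).mpr ((hmem x ((PySem.Set.mem_ofList a x).mp hx)).1)
    have hperm : (PySem.Set.ofList a).Perm (PySem.Set.ofList b) :=
      ((PySem.Set.nodup_ofList a).subperm hsub).perm_of_length_le (le_of_eq hlen.symm)
    refine List.perm_iff_count.mpr (fun k => ?_)
    by_cases hk : k ∈ a
    · exact ((hmem k hk).2).symm
    · have hkb : k ∉ b := by
        intro hkb
        exact hk ((PySem.Set.mem_ofList a k).mp
          (hperm.mem_iff.mpr ((PySem.Set.mem_ofList b k).mpr hkb)))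
      rw [List.count_eq_zero.mpr hk, List.count_eq_zero.mpr hkb]
  · intro h
    have hmemiff : ∀ x, x ∈ PySem.Set.ofList a ↔ x ∈ PySem.Set.ofList b := by
      intro x; rw [PySem.Set.mem_ofList, PySem.Set.mem_ofList]; exact h.mem_iff
    have hperm := (List.perm_ext_iff_of_nodup (PySem.Set.nodup_ofList a)
      (PySem.Set.nodup_ofList b)).mpr hmemiff
    refine ⟨hperm.length_eq, ?_⟩
    intro p hp
    rw [PySem.Dict.items_counter] at hp
    obtain ⟨k, hk, rfl⟩ := List.mem_map.mp hp
    exact (counter_get?_iff b k (List.count k a)).mpr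
      ⟨h.mem_iff.mp ((PySem.Set.mem_ofList a k).mp hk), (h.count_eq k).symm⟩

-- characterisation of A on a non-empty list of lines
theorem A_char (fl l0 : String) (rest : List String) :
    checkIfAnagram fl (l0 :: rest) = true ↔
      (∀ line ∈ l0 :: rest,
        PySem.Set.equal (PySem.Set.ofList fl.toList) (PySem.Set.ofList line.toList) = true) ∧
      (∀ line ∈ l0 :: rest, pyDictEqCI (ciaCount line.toList) (ciaCount l0.toList) = true) := by
  unfold checkIfAnagram
  have hmap : (l0 :: rest).foldl (fun arr line => arr ++ [ciaCount line.toList])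
      ([] : List (PySem.Dict Char Int)) = (l0 :: rest).map (fun line => ciaCount line.toList) := by
    simpa using PySem.List.foldl_append_singleton_eq_map
      (fun line : String => ciaCount line.toList) (l0 :: rest) []
  simp only [hmap, List.map_cons]
  split_ifs with h1 h2
  · simp only [List.any_eq_true, Bool.not_eq_true'] at h1
    obtain ⟨line, hl, hx⟩ := h1
    constructor
    · intro h; cases h
    · rintro ⟨hs, -⟩; rw [hs line hl] at hx; cases hx
  · simp only [List.any_eq_true, Bool.not_eq_true'] at h2
    obtain ⟨d, hd, hx⟩ := h2
    constructor
    · intro h; cases h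
    · rintro ⟨-, hp⟩
      rcases List.mem_cons.mp hd with rfl | hd'
      · rw [hp l0 (List.mem_cons_self ..)] at hx; cases hx
      · obtain ⟨line, hl, rfl⟩ := List.mem_map.mp hd'
        rw [hp line (List.mem_cons_of_mem _ hl)] at hx; cases hx
  · constructor
    · intro _
      refine ⟨?_, ?_⟩
      · intro line hl
        by_contra hc
        rw [Bool.not_eq_true] at hc
        exact h1 (List.any_eq_true.mpr ⟨line, hl, by rw [hc]; rfl⟩)
      · intro line hl
        by_contra hc
        rw [Bool.not_eq_true] at hc
        refine h2 (List.any_eq_true.mpr ⟨ciaCount line.toList, ?_, by rw [hc]; rfl⟩)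
        rcases List.mem_cons.mp hl with rfl | hl'
        · exact List.mem_cons_self ..
        · exact List.mem_cons_of_mem _ (List.mem_map_of_mem hl')
    · intro _; rfl

-- characterisation of B on a non-empty list of lines
theorem B_char (fl l0 : String) (rest : List String) :
    checkIfAnagram_alt fl (l0 :: rest) = true ↔
      ∀ line ∈ l0 :: rest,
        PySem.Set.equal (PySem.Set.ofList line.toList) (PySem.Set.ofList fl.toList) = true ∧
        PySem.List.sorted line.toList (fun c => c) false =
          PySem.List.sorted l0.toList (fun c => c) false := by
  unfold checkIfAnagram_alt
  simp only [List.all_eq_true, Bool.and_eq_true, beq_iff_eq]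

-- ===== VERDICT (by name: the statement is the Claim_ definition above) =====
theorem checkIfAnagram_spec : Claim_equal_checkIfAnagram := by
  intro fl ls _
  unfold Spec_checkIfAnagram
  cases ls with
  | nil => rfl
  | cons l0 rest =>
    rw [Bool.eq_iff_iff, A_char, B_char]
    constructor
    · rintro ⟨h1, h2⟩ line hl
      refine ⟨?_, ?_⟩
      · rw [PySem.Set.equal_iff]
        intro x
        exact ((PySem.Set.equal_iff _ _).mp (h1 line hl) x).symm
      · refine (PySem.List.sorted_id_eq_sorted_id_iff_perm _ _).mpr ?_
        refine (pyDictEqCI_counter_iff line.toList l0.toList).mp ?_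
        rw [← ciaCount_eq_counter, ← ciaCount_eq_counter]
        exact h2 line hl
    · intro h
      refine ⟨fun line hl => ?_, fun line hl => ?_⟩
      · rw [PySem.Set.equal_iff]
        intro x
        exact ((PySem.Set.equal_iff _ _).mp (h line hl).1 x).symm
      · rw [ciaCount_eq_counter, ciaCount_eq_counter, pyDictEqCI_counter_iff]
        exact (PySem.List.sorted_id_eq_sorted_id_iff_perm _ _).mp (h line hl).2
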